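-- pv_equiv track=rewrite | github.com/ImVictorM/Algorithms | challenges/challenge_study_schedule.py | study_schedule
-- ===== SOURCE A (Python) =====
-- def study_schedule(permanence_period, target_time):
--     if target_time is None:
--         return None
--
--     people_present_in_target_time = 0
--
--     for entry_time, exit_time in permanence_period:
--         if isinstance(entry_time, int) and isinstance(exit_time, int):
--             if entry_time <= target_time <= exit_time:
--                 people_present_in_target_time += 1
--         else:
--             return None
--
--     return people_present_in_target_time
-- ===== SOURCE B (Python) =====
-- def study_schedule(permanence_period, target_time):
--     if target_time is None:
--         return None
--     permanence_period = list(permanence_period)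
--     if not all(isinstance(e, int) and isinstance(x, int) for e, x in permanence_period):
--         return None
--     return sum(1 for e, x in permanence_period if e <= target_time <= x)
-- ===== Notes on version B (the rewrite author's own statement) =====
-- stated objective: simpler
-- what changed: B separates a full validation pass (all entries are int pairs) from the counting, which becomes a single sum over a comprehension, instead of A's one loop interleaving validation, counting and an early return.
import Mathlib
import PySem

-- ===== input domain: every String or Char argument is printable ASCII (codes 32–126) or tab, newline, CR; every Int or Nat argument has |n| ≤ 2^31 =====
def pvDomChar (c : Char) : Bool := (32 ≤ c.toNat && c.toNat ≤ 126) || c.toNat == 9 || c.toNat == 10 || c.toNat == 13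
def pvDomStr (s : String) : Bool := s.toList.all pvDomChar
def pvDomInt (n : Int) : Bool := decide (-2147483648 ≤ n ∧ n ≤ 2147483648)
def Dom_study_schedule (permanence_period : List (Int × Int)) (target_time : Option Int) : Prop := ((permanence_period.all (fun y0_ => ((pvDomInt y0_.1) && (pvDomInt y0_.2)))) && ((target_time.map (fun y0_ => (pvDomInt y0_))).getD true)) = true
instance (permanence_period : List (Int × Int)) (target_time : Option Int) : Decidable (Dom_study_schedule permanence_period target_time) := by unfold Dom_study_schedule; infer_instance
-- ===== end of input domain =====

-- B separates a full validation pass from the counting (a countP), instead of A's single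
-- interleaved loop with an accumulator and early return; same O(n) cost, plainer decomposition.
-- ===== PORT A =====
-- A's loop: accumulates the count over the pairs; the 'isinstance(_, int)' test is always
-- true for Int × Int entries under the type convention, so the 'return None' branch of A is
-- unreachable here and the loop never exits early.
def pvALoop (t : Int) : List (Int × Int) → Int → Int
  | [], acc => acc
  | (e, x) :: rest, acc =>
      pvALoop t rest (if e ≤ t ∧ t ≤ x then acc + 1 else acc)

def study_schedule (permanence_period : List (Int × Int)) (target_time : Option Int) : Option Int :=
  match target_time with
  | none => none
  | some t => some (pvALoop t permanence_period 0)

-- ===== PORT B =====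
-- B: validation pass (trivially true on Int × Int entries), then a count of the matching pairs.
def study_schedule_alt (permanence_period : List (Int × Int)) (target_time : Option Int) : Option Int :=
  match target_time with
  | none => none
  | some t =>
      if permanence_period.all (fun _ => true) then
        some (Int.ofNat (permanence_period.countP (fun p => decide (p.1 ≤ t ∧ t ≤ p.2))))
      else none

-- ===== PRECONDITION & SPEC =====
def Spec_study_schedule (permanence_period : List (Int × Int)) (target_time : Option Int) (out : Option Int) : Prop := out = study_schedule_alt permanence_period target_time
instance (permanence_period : List (Int × Int)) (target_time : Option Int) (out : Option Int) : Decidable (Spec_study_schedule permanence_period target_time out) := by unfold Spec_study_schedule; infer_instance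

-- ===== CLAIM (what is proved, stated in full; the proofs are below) =====
def Claim_equal_study_schedule : Prop := ∀ (permanence_period : List (Int × Int)) (target_time : Option Int), Dom_study_schedule permanence_period target_time → Spec_study_schedule permanence_period target_time (study_schedule permanence_period target_time)

-- ===== LEMMAS AND PROOFS =====

-- ===== VERDICT (by name: the statement is the Claim_ definition above) =====
lemma pvALoop_eq (t : Int) (l : List (Int × Int)) (acc : Int) :
    pvALoop t l acc = acc + Int.ofNat (l.countP (fun p => decide (p.1 ≤ t ∧ t ≤ p.2))) := by
  induction l generalizing acc with
  | nil => simp [pvALoop]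
  | cons hd tl ih =>
      obtain ⟨e, x⟩ := hd
      simp only [pvALoop, List.countP_cons, ih]
      by_cases h : e ≤ t ∧ t ≤ x <;> simp [h] <;> omega

theorem study_schedule_spec : Claim_equal_study_schedule := by
  intro pp tt _
  unfold Spec_study_schedule study_schedule study_schedule_alt
  cases tt with
  | none => rfl
  | some t => simp [pvALoop_eq]
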